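-- pv_equiv track=rewrite | github.com/arwyn6969/CODEFINDER | statistical_significance_analysis.py | aggregate_character_counts
-- ===== SOURCE A (Python) =====
-- from collections import defaultdict
-- from typing import Dict, List, Tuple
--
-- def aggregate_character_counts(results: List[Dict]) -> Tuple[Dict, Dict]:
--     """Aggregate character counts across all pages for both editions."""
--
--     wright_totals = defaultdict(int)
--     aspley_totals = defaultdict(int)
--
--     # Track page-level data for variance calculation
--     wright_by_page = defaultdict(list)
--     aspley_by_page = defaultdict(list)
--
--     for r in results:
--         for char, data in r.get('char_deltas', {}).items():
--             wright_totals[char] += data['wright']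
--             aspley_totals[char] += data['aspley']
--             wright_by_page[char].append(data['wright'])
--             aspley_by_page[char].append(data['aspley'])
--
--         # Add characters that appear in only one edition
--         # (char_deltas only contains diffs, need to check for zeros)
--
--     return dict(wright_totals), dict(aspley_totals)
-- ===== SOURCE B (Python) =====
-- from typing import Dict, List, Tuple
--
-- def aggregate_character_counts(results: List[Dict]) -> Tuple[Dict, Dict]:
--     """Aggregate character counts: flatten to (char, wright, aspley) triples,
--     take the characters in first-seen order, then total each character by
--     scanning the flat list (flatten / ordered-dedup / per-key scan)."""
--     items = [(char, data['wright'], data['aspley'])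
--              for r in results
--              for char, data in r.get('char_deltas', {}).items()]
--     chars = list(dict.fromkeys(char for char, _, _ in items))
--     wright_totals = {c: sum(w for ch, w, _ in items if ch == c) for c in chars}
--     aspley_totals = {c: sum(a for ch, _, a in items if ch == c) for c in chars}
--     return wright_totals, aspley_totals
-- ===== Notes on version B (the rewrite author's own statement) =====
-- stated objective: alternative
-- what changed: A makes one pass accumulating running totals in defaultdict(int)s keyed by character; B never accumulates into a dict at all: it flattens everything into a list of (char, wright, aspley) triples, dedups the characters in first-seen order, and then computes each character's totals by an independent scan of the flat list (filter-and-sum per key).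
import Mathlib
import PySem

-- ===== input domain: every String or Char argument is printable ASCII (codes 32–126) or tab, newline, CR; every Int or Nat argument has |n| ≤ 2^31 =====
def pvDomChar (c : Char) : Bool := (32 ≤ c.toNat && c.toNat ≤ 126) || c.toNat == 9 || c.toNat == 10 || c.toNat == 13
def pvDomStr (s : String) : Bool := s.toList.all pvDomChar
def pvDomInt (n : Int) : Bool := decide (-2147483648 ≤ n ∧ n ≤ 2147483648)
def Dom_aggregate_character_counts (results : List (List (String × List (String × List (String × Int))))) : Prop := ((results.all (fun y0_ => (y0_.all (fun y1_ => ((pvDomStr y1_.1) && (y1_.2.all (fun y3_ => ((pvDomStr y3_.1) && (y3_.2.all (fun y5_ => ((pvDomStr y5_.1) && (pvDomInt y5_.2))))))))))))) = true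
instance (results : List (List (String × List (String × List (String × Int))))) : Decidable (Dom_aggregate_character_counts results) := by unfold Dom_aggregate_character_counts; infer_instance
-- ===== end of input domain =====

-- B replaces A's single-pass dict accumulation by flatten / ordered-dedup / per-key scan-and-sum (alternative algorithm, same results).


-- ===== PORT A =====
-- the char_deltas dict of a result r (r.get('char_deltas', {})), as a PySem.Dict
def pvCharDeltas (r : List (String × List (String × List (String × Int)))) : PySem.Dict String (List (String × Int)) :=
  PySem.Dict.ofList ((PySem.Dict.ofList r).getD "char_deltas" [])

-- A's inner-loop body: one (char, data) item updates the four defaultdicts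
def pvStepA (st : PySem.Dict String Int × PySem.Dict String Int × PySem.Dict String (List Int) × PySem.Dict String (List Int))
    (p : String × List (String × Int)) :
    PySem.Dict String Int × PySem.Dict String Int × PySem.Dict String (List Int) × PySem.Dict String (List Int) :=
  let w := (PySem.Dict.ofList p.2).getD "wright" 0   -- data['wright'] (present under Pre_)
  let a := (PySem.Dict.ofList p.2).getD "aspley" 0   -- data['aspley'] (present under Pre_)
  (st.1.modify p.1 0 (· + w), st.2.1.modify p.1 0 (· + a),
   st.2.2.1.modify p.1 [] (· ++ [w]), st.2.2.2.modify p.1 [] (· ++ [a]))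

def aggregate_character_counts (results : List (List (String × List (String × List (String × Int))))) : (List (String × Int)) × (List (String × Int)) :=
  let st := results.foldl (fun st r => (pvCharDeltas r).items.foldl pvStepA st)
    (PySem.Dict.empty, PySem.Dict.empty, PySem.Dict.empty, PySem.Dict.empty)
  (st.1.items, st.2.1.items)

-- ===== PORT B =====
-- B's flat list of (char, wright, aspley) triples
def pvFlat (results : List (List (String × List (String × List (String × Int))))) : List (String × Int × Int) :=
  results.flatMap (fun r => (pvCharDeltas r).items.map (fun p =>
    (p.1, (PySem.Dict.ofList p.2).getD "wright" 0, (PySem.Dict.ofList p.2).getD "aspley" 0)))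

def aggregate_character_counts_alt (results : List (List (String × List (String × List (String × Int))))) : (List (String × Int)) × (List (String × Int)) :=
  let items := pvFlat results
  let chars := PySem.List.dedup (items.map (fun t => t.1))   -- list(dict.fromkeys(...)): first occurrences in order
  (chars.map (fun c => (c, ((items.filter (fun t => t.1 == c)).map (fun t => t.2.1)).sum)),
   chars.map (fun c => (c, ((items.filter (fun t => t.1 == c)).map (fun t => t.2.2)).sum)))

-- ===== PRECONDITION & SPEC =====
-- Pre_ excludes exactly the inputs on which Python A raises KeyError: some visited data dict lacking the 'wright' or 'aspley' key.
def Pre_aggregate_character_counts (results : List (List (String × List (String × List (String × Int))))) : Prop :=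
  ∀ r ∈ results, ∀ p ∈ (pvCharDeltas r).items,
    (PySem.Dict.ofList p.2).contains "wright" = true ∧ (PySem.Dict.ofList p.2).contains "aspley" = true
instance (results : List (List (String × List (String × List (String × Int))))) : Decidable (Pre_aggregate_character_counts results) := by unfold Pre_aggregate_character_counts; infer_instance
def pvWitness_aggregate_character_counts : (List (List (String × List (String × List (String × Int))))) :=
  [[("char_deltas", [("a", [("wright", 1), ("aspley", 2)]), ("b", [("wright", -3), ("aspley", 0)])])],
   [("char_deltas", [("a", [("wright", 5), ("aspley", -1)])]), ("other", [])]]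
def Spec_aggregate_character_counts (results : List (List (String × List (String × List (String × Int))))) (out : (List (String × Int)) × (List (String × Int))) : Prop := out = aggregate_character_counts_alt results
instance (results : List (List (String × List (String × List (String × Int))))) (out : (List (String × Int)) × (List (String × Int))) : Decidable (Spec_aggregate_character_counts results out) := by unfold Spec_aggregate_character_counts; infer_instance

-- ===== CLAIM (what is proved, stated in full; the proofs are below) =====
def Claim_equal_aggregate_character_counts : Prop := ∀ (results : List (List (String × List (String × List (String × Int))))), Dom_aggregate_character_counts results → Pre_aggregate_character_counts results → Spec_aggregate_character_counts results (aggregate_character_counts results)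

-- ===== LEMMAS AND PROOFS =====
-- the two elementary accumulation steps A's loop is built from
def pvAdd (d : PySem.Dict String Int) (q : String × Int) : PySem.Dict String Int :=
  d.modify q.1 0 (· + q.2)
def pvApp (g : PySem.Dict String (List Int)) (q : String × Int) : PySem.Dict String (List Int) :=
  g.modify q.1 [] (· ++ [q.2])
-- projections of a (char, data) item to its (char, wright) / (char, aspley) pair
def pvPW (p : String × List (String × Int)) : String × Int := (p.1, (PySem.Dict.ofList p.2).getD "wright" 0)
def pvPA (p : String × List (String × Int)) : String × Int := (p.1, (PySem.Dict.ofList p.2).getD "aspley" 0)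

-- A's 4-tuple fold splits into four independent folds (inner loop)
theorem pvFold4_inner (l : List (String × List (String × Int))) :
    ∀ st, l.foldl pvStepA st =
      ((l.map pvPW).foldl pvAdd st.1, (l.map pvPA).foldl pvAdd st.2.1,
       (l.map pvPW).foldl pvApp st.2.2.1, (l.map pvPA).foldl pvApp st.2.2.2) := by
  induction l with
  | nil => intro st; rfl
  | cons p t ih => intro st; exact ih _

-- …and over the whole results list, against the flat triple list
theorem pvFold4_outer (results : List (List (String × List (String × List (String × Int))))) :
    ∀ st, results.foldl (fun st r => (pvCharDeltas r).items.foldl pvStepA st) st =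
      (((pvFlat results).map (fun t => (t.1, t.2.1))).foldl pvAdd st.1,
       ((pvFlat results).map (fun t => (t.1, t.2.2))).foldl pvAdd st.2.1,
       ((pvFlat results).map (fun t => (t.1, t.2.1))).foldl pvApp st.2.2.1,
       ((pvFlat results).map (fun t => (t.1, t.2.2))).foldl pvApp st.2.2.2) := by
  induction results with
  | nil => intro st; rfl
  | cons r t ih =>
      intro st
      have hW : ((pvCharDeltas r).items.map (fun p => (p.1, (PySem.Dict.ofList p.2).getD "wright" 0,
          (PySem.Dict.ofList p.2).getD "aspley" 0))).map (fun t => (t.1, t.2.1))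
          = (pvCharDeltas r).items.map pvPW := by simp [pvPW]
      have hA : ((pvCharDeltas r).items.map (fun p => (p.1, (PySem.Dict.ofList p.2).getD "wright" 0,
          (PySem.Dict.ofList p.2).getD "aspley" 0))).map (fun t => (t.1, t.2.2))
          = (pvCharDeltas r).items.map pvPA := by simp [pvPA]
      rw [List.foldl_cons, ih, pvFold4_inner]
      simp only [pvFlat, List.flatMap_cons, List.map_append, List.foldl_append]
      rw [hW, hA]

-- the defaultdict(int) accumulation fold, characterised pointwise …
theorem pvGetD_fold_add (s : List (String × Int)) :
    ∀ (d : PySem.Dict String Int) (c : String),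
      (s.foldl pvAdd d).getD c 0 = d.getD c 0 + ((s.filter (fun q => q.1 == c)).map (fun q => q.2)).sum := by
  induction s with
  | nil => intro d c; simp
  | cons q t ih =>
      intro d c
      by_cases h : q.1 = c
      · simp only [List.foldl_cons, List.filter_cons, h, beq_self_eq_true, if_pos, List.map_cons,
          List.sum_cons, ih, pvAdd]
        rw [PySem.Dict.getD_modify_self]
        show d.getD c 0 + q.2 + _ = _
        omega
      · have hb : (q.1 == c) = false := by simp [h]
        simp only [List.foldl_cons, List.filter_cons, hb, Bool.false_eq_true, if_false, ih, pvAdd]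
        rw [PySem.Dict.getD_modify, if_neg (fun hc => h hc.symm)]

-- …and as a whole items list: exactly B's dedup-then-scan formula
theorem pvItems_fold_add (s : List (String × Int)) :
    (s.foldl pvAdd PySem.Dict.empty).items =
      (PySem.List.dedup (s.map (fun q => q.1))).map
        (fun c => (c, ((s.filter (fun q => q.1 == c)).map (fun q => q.2)).sum)) := by
  have hkeys : (s.foldl pvAdd PySem.Dict.empty).keys = PySem.List.dedup (s.map (fun q => q.1)) := by
    have := PySem.Dict.keys_foldl_modify_key (l := s) (key := fun q : String × Int => q.1)
      (d0 := (0 : Int)) (f := fun _ q => (· + q.2)) (d := PySem.Dict.empty)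
    simpa [pvAdd, PySem.Dict.keys_empty, PySem.Set.update_nil_left] using this
  have hnd : (s.foldl pvAdd PySem.Dict.empty).keys.Nodup := by
    rw [hkeys]; exact PySem.List.nodup_dedup _
  rw [PySem.Dict.items_eq_map_keys _ hnd (0 : Int), hkeys]
  exact List.map_congr_left fun c _ => by
    rw [pvGetD_fold_add s PySem.Dict.empty c, PySem.Dict.getD_empty]
    simp

-- filtering the flat triples commutes with projecting to (char, value) pairs
theorem pvFilter_map {f : String × Int × Int → Int}
    (items : List (String × Int × Int)) (c : String) :
    ((items.map (fun t => (t.1, f t))).filter (fun q => q.1 == c)).map (fun q => q.2)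
      = (items.filter (fun t => t.1 == c)).map f := by
  rw [List.filter_map]
  simp [Function.comp_def]

-- ===== VERDICT (by name: the statement is the Claim_ definition above) =====
theorem aggregate_character_counts_spec : Claim_equal_aggregate_character_counts := by
  intro results _ _
  unfold Spec_aggregate_character_counts aggregate_character_counts aggregate_character_counts_alt
  rw [pvFold4_outer]
  dsimp only
  refine Prod.ext ?_ ?_
  all_goals dsimp only
  all_goals rw [pvItems_fold_add]
  all_goals simp only [List.map_map, Function.comp_def]
  all_goals refine List.map_congr_left fun c _ => ?_
  all_goals rw [pvFilter_map]
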